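-- pv_equiv track=rewrite | github.com/Awen-dream/ai_secure_rag_gateway | app/application/ingestion/pipelines.py | _collect_code_block
-- ===== SOURCE A (Python) =====
-- def _is_code_fence(line: str) -> bool:
--     stripped = line.strip()
--     return stripped.startswith("```") or stripped.startswith("~~~")
--
-- def _collect_code_block(lines: list[str], start: int) -> tuple[list[str], int]:
--     block_lines = [lines[start]]
--     index = start + 1
--     while index < len(lines):
--         block_lines.append(lines[index])
--         if _is_code_fence(lines[index]):
--             return block_lines, index + 1
--         index += 1
--     return block_lines, index
-- ===== SOURCE B (Python) =====
-- def _is_code_fence(line: str) -> bool: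
--     stripped = line.strip()
--     return stripped.startswith("```") or stripped.startswith("~~~")
--
-- def _collect_code_block(lines, start):
--     first = lines[start]
--     n = len(lines)
--     fence_at = next((j for j in range(start + 1, n) if _is_code_fence(lines[j])), None)
--     stop = n if fence_at is None else fence_at + 1
--     return [first] + [lines[j] for j in range(start + 1, stop)], stop
-- ===== Notes on version B (the rewrite author's own statement) =====
-- stated objective: simpler
-- what changed: A grows an accumulator list while walking an index loop; B first searches for the index of the first fence after start and then materialises the block from that index in one expression, so no mutable accumulator or early-return loop remains.
import Mathlib
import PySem

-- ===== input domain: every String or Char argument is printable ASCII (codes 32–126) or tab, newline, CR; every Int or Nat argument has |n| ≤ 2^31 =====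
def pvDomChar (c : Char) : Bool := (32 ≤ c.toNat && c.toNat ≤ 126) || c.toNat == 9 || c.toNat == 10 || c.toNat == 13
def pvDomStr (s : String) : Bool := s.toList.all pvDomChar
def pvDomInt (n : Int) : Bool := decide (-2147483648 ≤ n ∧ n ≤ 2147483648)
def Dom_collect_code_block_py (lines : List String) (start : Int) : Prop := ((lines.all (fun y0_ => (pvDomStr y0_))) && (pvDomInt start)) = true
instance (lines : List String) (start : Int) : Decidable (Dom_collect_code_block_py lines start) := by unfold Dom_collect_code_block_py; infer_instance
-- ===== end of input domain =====

-- B replaces A's accumulator loop by a find-the-fence-index search followed by one range-map; same O(n) cost, no accumulator.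

-- ===== PORT A =====
def pvIsCodeFence (line : String) : Bool :=
  let stripped := PySem.Str.strip line
  PySem.Str.startswith stripped "```" || PySem.Str.startswith stripped "~~~"

-- the 'while index < len(lines)' loop of A, carrying (index, block_lines)
def pvALoop (lines : List String) (index : Int) (block : List String) : List String × Int :=
  if _h : index < (lines.length : Int) then
    let block' := block ++ [PySem.List.pyGetD lines index ""]
    if pvIsCodeFence (PySem.List.pyGetD lines index "") then (block', index + 1)
    else pvALoop lines (index + 1) block'
  else (block, index)
termination_by ((lines.length : Int) - index).toNat
decreasing_by omega

def collect_code_block_py (lines : List String) (start : Int) : List String × Int :=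
  pvALoop lines (start + 1) [PySem.List.pyGetD lines start ""]

-- ===== PORT B =====
def collect_code_block_py_alt (lines : List String) (start : Int) : List String × Int :=
  let first := PySem.List.pyGetD lines start ""
  let n : Int := lines.length
  let fence_at := (PySem.List.pyRange (start + 1) n 1).find?
    (fun j => pvIsCodeFence (PySem.List.pyGetD lines j ""))
  let stop := match fence_at with | none => n | some j => j + 1
  (first :: (PySem.List.pyRange (start + 1) stop 1).map (fun j => PySem.List.pyGetD lines j ""), stop)

-- ===== PRECONDITION & SPEC =====
-- Pre_ excludes exactly the inputs where Python A raises IndexError on lines[start] (B raises there too).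
def Pre_collect_code_block_py (lines : List String) (start : Int) : Prop :=
  PySem.Raise.InRange lines.length start
instance (lines : List String) (start : Int) : Decidable (Pre_collect_code_block_py lines start) := by
  unfold Pre_collect_code_block_py; infer_instance

def pvWitness_collect_code_block_py : List String × Int := (["```py", "x = 1", "```"], 0)

def Spec_collect_code_block_py (lines : List String) (start : Int) (out : List String × Int) : Prop := out = collect_code_block_py_alt lines start
instance (lines : List String) (start : Int) (out : List String × Int) : Decidable (Spec_collect_code_block_py lines start out) := by unfold Spec_collect_code_block_py; infer_instance

-- ===== CLAIM (what is proved, stated in full; the proofs are below) =====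
def Claim_equal_collect_code_block_py : Prop := ∀ (lines : List String) (start : Int), Dom_collect_code_block_py lines start → Pre_collect_code_block_py lines start → Spec_collect_code_block_py lines start (collect_code_block_py lines start)

-- ===== LEMMAS AND PROOFS =====

-- A's loop from index i (with i ≤ len) computes exactly B's search-then-map result appended to its accumulator.
theorem pvALoop_eq (lines : List String) (i : Int) (hi : i ≤ (lines.length : Int)) (block : List String) :
    pvALoop lines i block =
      match (PySem.List.pyRange i (lines.length : Int) 1).find?
          (fun j => pvIsCodeFence (PySem.List.pyGetD lines j "")) with
      | none => (block ++ (PySem.List.pyRange i (lines.length : Int) 1).map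
          (fun j => PySem.List.pyGetD lines j ""), (lines.length : Int))
      | some j => (block ++ (PySem.List.pyRange i (j + 1) 1).map
          (fun j => PySem.List.pyGetD lines j ""), j + 1) := by
  generalize hfuel : ((lines.length : Int) - i).toNat = fuel
  induction fuel generalizing i block with
  | zero =>
      have hin : i = (lines.length : Int) := by omega
      subst hin
      rw [pvALoop]
      simp [PySem.List.pyRange_one_eq_nil (le_refl _)]
  | succ k ih =>
      have hlt : i < (lines.length : Int) := by omega
      rw [pvALoop]
      rw [PySem.List.pyRange_one_cons hlt]
      simp only [dif_pos hlt, List.find?_cons]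
      by_cases hp : pvIsCodeFence (PySem.List.pyGetD lines i "") = true
      · simp only [hp, if_pos]
        rw [PySem.List.pyRange_one_singleton]
        simp
      · rw [if_neg hp]
        simp only [Bool.not_eq_true] at hp
        simp only [hp]
        rw [ih (i + 1) (by omega) _ (by omega)]
        cases hfind : (PySem.List.pyRange (i + 1) (lines.length : Int) 1).find?
            (fun j => pvIsCodeFence (PySem.List.pyGetD lines j "")) with
        | none =>
            simp [List.append_assoc]
        | some j =>
            have hj : i + 1 ≤ j := by
              have := List.find?_some hfind
              have hmem := List.mem_of_find?_eq_some hfind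
              have := (PySem.List.mem_pyRange_one).1 hmem
              omega
            simp [PySem.List.pyRange_one_cons (show i < j + 1 by omega), List.append_assoc]

-- ===== VERDICT (by name: the statement is the Claim_ definition above) =====
theorem collect_code_block_py_spec : Claim_equal_collect_code_block_py := by
  intro lines start _hdom hpre
  unfold Spec_collect_code_block_py
  unfold Pre_collect_code_block_py PySem.Raise.InRange at hpre
  unfold collect_code_block_py collect_code_block_py_alt
  rw [pvALoop_eq lines (start + 1) (by omega)]
  cases hfind : (PySem.List.pyRange (start + 1) (lines.length : Int) 1).find?
      (fun j => pvIsCodeFence (PySem.List.pyGetD lines j "")) with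
  | none => simp [hfind]
  | some j => simp [hfind]
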